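-- pv_equiv track=rewrite | github.com/ldecampos/craftRig | lib/naming.py | decrement_character
-- ===== SOURCE A (Python) =====
-- def decrement_character(text: str) -> str:
--     """Decrement a letter sequence in a manner similar to Excel column naming
--
--     - Works for both uppercase and lowercase sequences
--     - Handles cases like 'AAA' → 'ZZ' and 'aaa' → 'zz'
--
--     Args:
--         text (str): A text containing only letters ('A'-'Z' or 'a'-'z')
--
--     Returns:
--         str: The decremented letter sequence
--
--     Examples:
--         >>> decrement_character('B')
--         'A'
--         >>> decrement_character('AA')
--         'Z'
--         >>> decrement_character('a')
--         ''
--         >>> decrement_character('BA')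
--         'AZ'
--         >>> decrement_character('aaa')
--         'zz'
--     """
--
--     # Convert string to list for mutability
--     text = list(text)
--     # Check if the input is uppercase or lowercase
--     is_upper = text[0].isupper()
--     start_char = 'A' if is_upper else 'a'
--     end_char = 'Z' if is_upper else 'z'
--
--     # Start from the last character
--     i = len(text) - 1
--
--     while i >= 0:
--         if text[i] != start_char:
--             text[i] = chr(ord(text[i]) - 1)  # Decrement character
--             return ''.join(text)
--         else:
--             text[i] = end_char  # Reset current position to end character
--             i -= 1
--
--     # Remove one character from the start if all were 'A' or 'a'
--     return ''.join(text[1:])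
-- ===== SOURCE B (Python) =====
-- def decrement_character(text: str) -> str:
--     """Decrement an Excel-style letter sequence (closed-form rebuild)."""
--     is_upper = text[0].isupper()
--     start_char = 'A' if is_upper else 'a'
--     end_char = 'Z' if is_upper else 'z'
--     stripped = text.rstrip(start_char)
--     if not stripped:
--         return end_char * (len(text) - 1)
--     return stripped[:-1] + chr(ord(stripped[-1]) - 1) + end_char * (len(text) - len(stripped))
-- ===== Notes on version B (the rewrite author's own statement) =====
-- stated objective: idiomatic
-- what changed: B replaces A's per-character mutable-list carry loop by a closed-form rebuild: rstrip the trailing run of start characters, decrement the last remaining one, append the borrowed run of end characters.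
-- outside the precondition, e.g. on decrement_character(''): A raises IndexError, B raises IndexError
import Mathlib
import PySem

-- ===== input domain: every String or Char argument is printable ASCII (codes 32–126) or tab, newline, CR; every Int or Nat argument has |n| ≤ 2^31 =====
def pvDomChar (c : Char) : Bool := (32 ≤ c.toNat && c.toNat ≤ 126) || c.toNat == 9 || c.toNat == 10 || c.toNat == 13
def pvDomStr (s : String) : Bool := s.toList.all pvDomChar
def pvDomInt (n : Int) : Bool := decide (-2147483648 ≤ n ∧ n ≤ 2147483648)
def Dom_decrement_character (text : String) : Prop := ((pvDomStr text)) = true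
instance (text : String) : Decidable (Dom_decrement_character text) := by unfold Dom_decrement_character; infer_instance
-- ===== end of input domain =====

-- B rebuilds the decremented sequence in closed form (rstrip + one decrement + fill) instead of A's mutable carry loop; idiomatic, same cost.

-- ===== PORT A =====
-- A's while-loop, run over the REVERSED character list (Python scans i = n-1 .. 0);
-- `none` = the loop fell off the left end (every char equalled start_char and was replaced by end_char)
def pvALoop (startc endc : Char) : List Char → Option (List Char)
  | [] => none
  | c :: rest =>
      if c ≠ startc then some (Char.ofNat (c.toNat - 1) :: rest)
      else Option.map (fun r => endc :: r) (pvALoop startc endc rest)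

-- A's body on the character list (text = list(text); return is ''.join)
def pvABody : List Char → List Char
  | [] => []   -- Python: text[0] raises IndexError here (excluded by Pre_)
  | c :: cs =>
      let isUp := PySem.Chars.isupper c
      let startc := if isUp then 'A' else 'a'
      let endc := if isUp then 'Z' else 'z'
      match pvALoop startc endc (c :: cs).reverse with
      | some r => r.reverse
      | none => (List.replicate (c :: cs).length endc).drop 1  -- text[1:] with every slot set to end_char

def decrement_character (text : String) : String := String.ofList (pvABody text.toList)

-- ===== PORT B =====
def pvBBody : List Char → List Char
  | [] => []   -- Python: text[0] raises IndexError here (excluded by Pre_)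
  | c :: cs =>
      let isUp := PySem.Chars.isupper c
      let startc := if isUp then 'A' else 'a'
      let endc := if isUp then 'Z' else 'z'
      let all := c :: cs
      -- text.rstrip(start_char): exact — drops exactly the trailing run of startc
      let stripped := (all.reverse.dropWhile (· == startc)).reverse
      if stripped = [] then List.replicate (all.length - 1) endc
      else stripped.dropLast ++
             [Char.ofNat ((stripped.getLast?.getD ' ').toNat - 1)] ++
             List.replicate (all.length - stripped.length) endc

def decrement_character_alt (text : String) : String := String.ofList (pvBBody text.toList)

-- ===== PRECONDITION & SPEC =====
-- Python A evaluates text[0] and raises IndexError on the empty string; no other input raises.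
def Pre_decrement_character (text : String) : Prop := text.toList ≠ []
instance (text : String) : Decidable (Pre_decrement_character text) := by unfold Pre_decrement_character; infer_instance
def pvWitness_decrement_character : String := "BA"

def Spec_decrement_character (text : String) (out : String) : Prop := out = decrement_character_alt text
instance (text : String) (out : String) : Decidable (Spec_decrement_character text out) := by unfold Spec_decrement_character; infer_instance

-- ===== CLAIM (what is proved, stated in full; the proofs are below) =====
def Claim_equal_decrement_character : Prop := ∀ (text : String), Dom_decrement_character text → Pre_decrement_character text → Spec_decrement_character text (decrement_character text)

-- ===== LEMMAS AND PROOFS =====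

-- characterisation of A's carry loop: it peels the leading run of startc (in the reversed list)
theorem pvALoop_eq (startc endc : Char) (r : List Char) :
    pvALoop startc endc r =
      match r.dropWhile (· == startc) with
      | [] => none
      | c :: cs => some (List.replicate (r.takeWhile (· == startc)).length endc
                          ++ Char.ofNat (c.toNat - 1) :: cs) := by
  induction r with
  | nil => rfl
  | cons c rest ih =>
      by_cases h : c = startc
      · subst h
        simp only [pvALoop, List.dropWhile_cons, List.takeWhile_cons, BEq.rfl, if_true,
          ite_not, ih]
        cases hd : rest.dropWhile (· == c) <;> simp [List.replicate_succ]
      · have hb : (c == startc) = false := by simp [h]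
        simp [pvALoop, h, hb]

-- the two bodies agree on every nonempty list of characters
theorem pvBody_key (startc endc : Char) (l : List Char) :
    (match pvALoop startc endc l.reverse with
     | some r => r.reverse
     | none => (List.replicate l.length endc).drop 1)
    = (if (l.reverse.dropWhile (· == startc)).reverse = [] then
         List.replicate (l.length - 1) endc
       else
         ((l.reverse.dropWhile (· == startc)).reverse).dropLast ++
           [Char.ofNat ((((l.reverse.dropWhile (· == startc)).reverse).getLast?.getD ' ').toNat - 1)] ++
           List.replicate (l.length - ((l.reverse.dropWhile (· == startc)).reverse).length) endc) := by
  rw [pvALoop_eq]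
  have hsplit := List.takeWhile_append_dropWhile (p := (· == startc)) (l := l.reverse)
  cases hd : l.reverse.dropWhile (· == startc) with
  | nil =>
      simp [List.drop_replicate]
  | cons d ds =>
      rw [hd] at hsplit
      have hlen : (l.reverse.takeWhile (· == startc)).length + (ds.length + 1) = l.length := by
        have := congrArg List.length hsplit
        simpa using this
      have hcons : (d :: ds).reverse = ds.reverse ++ [d] := by simp
      rw [hcons]
      have hne : ds.reverse ++ [d] ≠ [] := by simp
      rw [if_neg hne, List.dropLast_concat, List.getLast?_concat]
      have hlen2 : l.length - (ds.reverse ++ [d]).length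
          = (l.reverse.takeWhile (· == startc)).length := by
        simp only [List.length_append, List.length_reverse, List.length_cons, List.length_nil]
        omega
      rw [hlen2]
      simp [List.reverse_replicate]

theorem pvBody_eq (l : List Char) (h : l ≠ []) : pvABody l = pvBBody l := by
  cases l with
  | nil => exact absurd rfl h
  | cons c cs =>
      simp only [pvABody, pvBBody]
      exact pvBody_key _ _ (c :: cs)

-- ===== VERDICT (by name: the statement is the Claim_ definition above) =====
theorem decrement_character_spec : Claim_equal_decrement_character := by
  intro text _ hpre
  unfold Spec_decrement_character decrement_character decrement_character_alt
  rw [pvBody_eq text.toList hpre]
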